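-- pv_equiv track=rewrite | github.com/edomari/GPAnalytics | app.py | get_pilot_name
-- ===== SOURCE A (Python) =====
-- def get_pilot_name(pilot_data):
--     pilot_name = None
--     for name in motogp_pilots:
--         if name[:6] in pilot_data:
--             pilot_name = name
--             break
--         if name[-3:] in pilot_data:
--             pilot_name = name
--
--     if not pilot_name:
--         pilot_name = "Nome non trovato"
--
--     return pilot_name
--
-- motogp_pilots = [
--     "Valentino ROSSI", "Nicky HAYDEN", "Dani PEDROSA", "Casey STONER", "Loris CAPIROSSI",
--     "Marco MELANDRI", "John HOPKINS", "Chris VERMEULEN", "Toni ELIAS", "Randy DE PUNIET",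
--     "Shinya NAKANO", "Makoto TAMADA", "Alex HOFMANN", "Kenny ROBERTS Jr.", "James ELLISON",
--     "Sylvain GUINTOLI", "Kurtis ROBERTS", "Anthony WEST", "Andrea DOVIZIOSO", "Jorge LORENZO",
--     "James TOSELAND", "Mika KALLIO", "Niccolo CANEPA", "Gabor TALMACSI", "Aleix ESPARGARO",
--     "Hiroshi AOYAMA", "Ben SPIES", "Marco SIMONCELLI", "Karel ABRAHAM", "Cal CRUTCHLOW",
--     "Stefan BRADL", "Colin EDWARDS", "Toni ELIAS", "Randy DE PUNIET", "Hector BARBERA",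
--     "Bradley SMITH", "Danilo PETRUCCI", "Scott REDDING", "Pol ESPARGARO", "Yonny HERNANDEZ",
--     "Marc MARQUEZ", "Michele PIRRO", "Maverick VIÑALES", "Jack MILLER", "Tito RABAT",
--     "Franco MORBIDELLI", "Johann ZARCO", "Takaaki NAKAGAMI", "Alex RINS", "Fabio QUARTARARO",
--     "Miguel OLIVEIRA", "Pecco BAGNAIA", "Joan MIR", "Iker LECUONA", "Luca MARINI",
--     "Brad BINDER", "Fabio DI GIANNANTONIO", "Remy GARDNER", "Augusto FERNANDEZ", "Jorge MARTIN",
--     "Raul FERNANDEZ", "Pedro ACOSTA", "Marco BEZZECCHI", "Enea BASTIANINI", "Lorenzo SAVADORI", "Alex MARQUEZ",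
--     "Andrea IANNONE", "Alvaro BAUTISTA", "Alex DE ANGELIS", "Loris BAZ", "Eugene LAVERTY",
--     "Claudio CORTI", "Troy BAYLISS"
-- ]
-- ===== SOURCE B (Python) =====
-- PILOT_NAMES = [
--     ("Valentino", "ROSSI"), ("Nicky", "HAYDEN"), ("Dani", "PEDROSA"), ("Casey", "STONER"),
--     ("Loris", "CAPIROSSI"), ("Marco", "MELANDRI"), ("John", "HOPKINS"), ("Chris", "VERMEULEN"),
--     ("Toni", "ELIAS"), ("Randy", "DE PUNIET"), ("Shinya", "NAKANO"), ("Makoto", "TAMADA"),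
--     ("Alex", "HOFMANN"), ("Kenny", "ROBERTS Jr."), ("James", "ELLISON"), ("Sylvain", "GUINTOLI"),
--     ("Kurtis", "ROBERTS"), ("Anthony", "WEST"), ("Andrea", "DOVIZIOSO"), ("Jorge", "LORENZO"),
--     ("James", "TOSELAND"), ("Mika", "KALLIO"), ("Niccolo", "CANEPA"), ("Gabor", "TALMACSI"),
--     ("Aleix", "ESPARGARO"), ("Hiroshi", "AOYAMA"), ("Ben", "SPIES"), ("Marco", "SIMONCELLI"),
--     ("Karel", "ABRAHAM"), ("Cal", "CRUTCHLOW"), ("Stefan", "BRADL"), ("Colin", "EDWARDS"),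
--     ("Toni", "ELIAS"), ("Randy", "DE PUNIET"), ("Hector", "BARBERA"), ("Bradley", "SMITH"),
--     ("Danilo", "PETRUCCI"), ("Scott", "REDDING"), ("Pol", "ESPARGARO"), ("Yonny", "HERNANDEZ"),
--     ("Marc", "MARQUEZ"), ("Michele", "PIRRO"), ("Maverick", "VI\u00d1ALES"), ("Jack", "MILLER"),
--     ("Tito", "RABAT"), ("Franco", "MORBIDELLI"), ("Johann", "ZARCO"), ("Takaaki", "NAKAGAMI"),
--     ("Alex", "RINS"), ("Fabio", "QUARTARARO"), ("Miguel", "OLIVEIRA"), ("Pecco", "BAGNAIA"),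
--     ("Joan", "MIR"), ("Iker", "LECUONA"), ("Luca", "MARINI"), ("Brad", "BINDER"),
--     ("Fabio", "DI GIANNANTONIO"), ("Remy", "GARDNER"), ("Augusto", "FERNANDEZ"), ("Jorge", "MARTIN"),
--     ("Raul", "FERNANDEZ"), ("Pedro", "ACOSTA"), ("Marco", "BEZZECCHI"), ("Enea", "BASTIANINI"),
--     ("Lorenzo", "SAVADORI"), ("Alex", "MARQUEZ"), ("Andrea", "IANNONE"), ("Alvaro", "BAUTISTA"),
--     ("Alex", "DE ANGELIS"), ("Loris", "BAZ"), ("Eugene", "LAVERTY"), ("Claudio", "CORTI"),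
--     ("Troy", "BAYLISS")
-- ]
--
-- def get_pilot_name(pilot_data):
--     # Pass 1: the first pilot whose 6-char prefix occurs in pilot_data wins outright.
--     for first, last in PILOT_NAMES:
--         name = first + " " + last
--         if name[:6] in pilot_data:
--             return name
--     # Pass 2: the LAST suffix match = the first one found scanning backwards.
--     for first, last in reversed(PILOT_NAMES):
--         name = first + " " + last
--         if name[-3:] in pilot_data:
--             return name
--     return "Nome non trovato"
-- ===== Notes on version B (the rewrite author's own statement) =====
-- stated objective: alternative
-- what changed: Replaced A's single interleaved loop with a break and a latched pilot_name over a list of full-name literals by two early-return passes over a roster stored as (first name, surname) pairs: a find-first forward scan on the 6-char prefix test, then a backwards scan returning the first (i.e. A's last) suffix match.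
import Mathlib
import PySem

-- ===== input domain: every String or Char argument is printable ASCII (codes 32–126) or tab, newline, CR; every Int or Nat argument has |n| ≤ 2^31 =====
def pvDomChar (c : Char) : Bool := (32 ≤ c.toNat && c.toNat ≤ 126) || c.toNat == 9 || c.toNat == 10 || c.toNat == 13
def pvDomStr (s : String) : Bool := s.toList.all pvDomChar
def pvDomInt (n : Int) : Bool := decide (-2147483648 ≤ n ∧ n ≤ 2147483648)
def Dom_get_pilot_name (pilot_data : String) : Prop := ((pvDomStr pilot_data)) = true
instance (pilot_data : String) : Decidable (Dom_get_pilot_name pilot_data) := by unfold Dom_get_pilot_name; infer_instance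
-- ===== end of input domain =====

-- B replaces A's single interleaved break/latch loop over a list of full-name literals by two
-- early-return passes (find-first on the prefix test, then first suffix match scanning BACKWARDS)
-- over a roster stored as (first name, surname) pairs joined at use; objective: alternative.

-- name[:6] in pilot_data
def preHit (pilot_data name : String) : Bool :=
  PySem.Str.isIn (PySem.Str.slice name none (some 6)) pilot_data

-- name[-3:] in pilot_data
def sufHit (pilot_data name : String) : Bool :=
  PySem.Str.isIn (PySem.Str.slice name (some (-3)) none) pilot_data

-- ===== PORT A =====
def motogp_pilots : List String := [
  "Valentino ROSSI", "Nicky HAYDEN", "Dani PEDROSA", "Casey STONER",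
  "Loris CAPIROSSI", "Marco MELANDRI", "John HOPKINS", "Chris VERMEULEN",
  "Toni ELIAS", "Randy DE PUNIET", "Shinya NAKANO", "Makoto TAMADA",
  "Alex HOFMANN", "Kenny ROBERTS Jr.", "James ELLISON", "Sylvain GUINTOLI",
  "Kurtis ROBERTS", "Anthony WEST", "Andrea DOVIZIOSO", "Jorge LORENZO",
  "James TOSELAND", "Mika KALLIO", "Niccolo CANEPA", "Gabor TALMACSI",
  "Aleix ESPARGARO", "Hiroshi AOYAMA", "Ben SPIES", "Marco SIMONCELLI",
  "Karel ABRAHAM", "Cal CRUTCHLOW", "Stefan BRADL", "Colin EDWARDS",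
  "Toni ELIAS", "Randy DE PUNIET", "Hector BARBERA", "Bradley SMITH",
  "Danilo PETRUCCI", "Scott REDDING", "Pol ESPARGARO", "Yonny HERNANDEZ",
  "Marc MARQUEZ", "Michele PIRRO", "Maverick VIÑALES", "Jack MILLER",
  "Tito RABAT", "Franco MORBIDELLI", "Johann ZARCO", "Takaaki NAKAGAMI",
  "Alex RINS", "Fabio QUARTARARO", "Miguel OLIVEIRA", "Pecco BAGNAIA",
  "Joan MIR", "Iker LECUONA", "Luca MARINI", "Brad BINDER",
  "Fabio DI GIANNANTONIO", "Remy GARDNER", "Augusto FERNANDEZ", "Jorge MARTIN",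
  "Raul FERNANDEZ", "Pedro ACOSTA", "Marco BEZZECCHI", "Enea BASTIANINI",
  "Lorenzo SAVADORI", "Alex MARQUEZ", "Andrea IANNONE", "Alvaro BAUTISTA",
  "Alex DE ANGELIS", "Loris BAZ", "Eugene LAVERTY", "Claudio CORTI",
  "Troy BAYLISS"]

-- A's for-loop: break on a prefix hit, latch the name on a suffix hit
def loopA (pilot_data : String) : List String → Option String → Option String
  | [], acc => acc
  | name :: rest, acc =>
    if preHit pilot_data name then some name
    else if sufHit pilot_data name then loopA pilot_data rest (some name)
    else loopA pilot_data rest acc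

def get_pilot_name (pilot_data : String) : String :=
  let pilot_name := loopA pilot_data motogp_pilots none
  -- 'if not pilot_name': true for None and for the empty string
  if (match pilot_name with | none => true | some s => s.toList.isEmpty) then
    "Nome non trovato"
  else pilot_name.getD ""

-- ===== PORT B =====
def PILOT_NAMES : List (String × String) := [
  ("Valentino", "ROSSI"), ("Nicky", "HAYDEN"), ("Dani", "PEDROSA"), ("Casey", "STONER"),
  ("Loris", "CAPIROSSI"), ("Marco", "MELANDRI"), ("John", "HOPKINS"), ("Chris", "VERMEULEN"),
  ("Toni", "ELIAS"), ("Randy", "DE PUNIET"), ("Shinya", "NAKANO"), ("Makoto", "TAMADA"),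
  ("Alex", "HOFMANN"), ("Kenny", "ROBERTS Jr."), ("James", "ELLISON"), ("Sylvain", "GUINTOLI"),
  ("Kurtis", "ROBERTS"), ("Anthony", "WEST"), ("Andrea", "DOVIZIOSO"), ("Jorge", "LORENZO"),
  ("James", "TOSELAND"), ("Mika", "KALLIO"), ("Niccolo", "CANEPA"), ("Gabor", "TALMACSI"),
  ("Aleix", "ESPARGARO"), ("Hiroshi", "AOYAMA"), ("Ben", "SPIES"), ("Marco", "SIMONCELLI"),
  ("Karel", "ABRAHAM"), ("Cal", "CRUTCHLOW"), ("Stefan", "BRADL"), ("Colin", "EDWARDS"),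
  ("Toni", "ELIAS"), ("Randy", "DE PUNIET"), ("Hector", "BARBERA"), ("Bradley", "SMITH"),
  ("Danilo", "PETRUCCI"), ("Scott", "REDDING"), ("Pol", "ESPARGARO"), ("Yonny", "HERNANDEZ"),
  ("Marc", "MARQUEZ"), ("Michele", "PIRRO"), ("Maverick", "VIÑALES"), ("Jack", "MILLER"),
  ("Tito", "RABAT"), ("Franco", "MORBIDELLI"), ("Johann", "ZARCO"), ("Takaaki", "NAKAGAMI"),
  ("Alex", "RINS"), ("Fabio", "QUARTARARO"), ("Miguel", "OLIVEIRA"), ("Pecco", "BAGNAIA"),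
  ("Joan", "MIR"), ("Iker", "LECUONA"), ("Luca", "MARINI"), ("Brad", "BINDER"),
  ("Fabio", "DI GIANNANTONIO"), ("Remy", "GARDNER"), ("Augusto", "FERNANDEZ"), ("Jorge", "MARTIN"),
  ("Raul", "FERNANDEZ"), ("Pedro", "ACOSTA"), ("Marco", "BEZZECCHI"), ("Enea", "BASTIANINI"),
  ("Lorenzo", "SAVADORI"), ("Alex", "MARQUEZ"), ("Andrea", "IANNONE"), ("Alvaro", "BAUTISTA"),
  ("Alex", "DE ANGELIS"), ("Loris", "BAZ"), ("Eugene", "LAVERTY"), ("Claudio", "CORTI"),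
  ("Troy", "BAYLISS")]

-- pass 1: first pair whose joined name has its 6-char prefix in pilot_data
-- (Python 'first + " " + last' is string concatenation, ported exactly as ++)
def scanPreP (pilot_data : String) : List (String × String) → Option String
  | [] => none
  | (first, last) :: rest =>
    let name := first ++ " " ++ last
    if preHit pilot_data name then some name else scanPreP pilot_data rest

-- pass 2, run on the REVERSED pair list: first pair whose joined name has its 3-char suffix in pilot_data
def scanSufP (pilot_data : String) : List (String × String) → Option String
  | [] => none
  | (first, last) :: rest =>
    let name := first ++ " " ++ last
    if sufHit pilot_data name then some name else scanSufP pilot_data rest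

def get_pilot_name_alt (pilot_data : String) : String :=
  match scanPreP pilot_data PILOT_NAMES with
  | some n => n
  | none =>
    match scanSufP pilot_data PILOT_NAMES.reverse with
    | some n => n
    | none => "Nome non trovato"

-- ===== PRECONDITION & SPEC =====
def Spec_get_pilot_name (pilot_data : String) (out : String) : Prop := out = get_pilot_name_alt pilot_data
instance (pilot_data : String) (out : String) : Decidable (Spec_get_pilot_name pilot_data out) := by unfold Spec_get_pilot_name; infer_instance

-- ===== CLAIM =====
def Claim_equal_get_pilot_name : Prop := ∀ (pilot_data : String), Dom_get_pilot_name pilot_data → Spec_get_pilot_name pilot_data (get_pilot_name pilot_data)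

-- ===== LEMMAS AND PROOFS =====

-- proof-only abstractions of B's two passes, over plain name lists
def joinP (p : String × String) : String := p.1 ++ " " ++ p.2

def scanPre (pilot_data : String) : List String → Option String
  | [] => none
  | name :: rest => if preHit pilot_data name then some name else scanPre pilot_data rest

def scanSuf (pilot_data : String) : List String → Option String
  | [] => none
  | name :: rest => if sufHit pilot_data name then some name else scanSuf pilot_data rest

theorem scanPreP_eq (pd : String) (l : List (String × String)) :
    scanPreP pd l = scanPre pd (l.map joinP) := by
  induction l with
  | nil => rfl
  | cons p rest ih => cases p with | mk f s => simp only [scanPreP, scanPre, List.map_cons, joinP, ih]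

theorem scanSufP_eq (pd : String) (l : List (String × String)) :
    scanSufP pd l = scanSuf pd (l.map joinP) := by
  induction l with
  | nil => rfl
  | cons p rest ih => cases p with | mk f s => simp only [scanSufP, scanSuf, List.map_cons, joinP, ih]

theorem scanSuf_append (pd : String) (u v : List String) :
    scanSuf pd (u ++ v) = (scanSuf pd u).or (scanSuf pd v) := by
  induction u with
  | nil => simp [scanSuf]
  | cons n rest ih => by_cases h : sufHit pd n <;> simp [scanSuf, h, ih]

theorem scanPre_mem (pd : String) (l : List String) (n : String)
    (h : scanPre pd l = some n) : n ∈ l := by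
  induction l with
  | nil => simp [scanPre] at h
  | cons m rest ih =>
    by_cases hm : preHit pd m
    · simp only [scanPre, hm, if_pos, Option.some.injEq] at h; simp [h]
    · simp only [scanPre, hm, if_neg, Bool.false_eq_true, not_false_iff] at h
      exact List.mem_cons_of_mem _ (ih h)

theorem scanSuf_mem (pd : String) (l : List String) (n : String)
    (h : scanSuf pd l = some n) : n ∈ l := by
  induction l with
  | nil => simp [scanSuf] at h
  | cons m rest ih =>
    by_cases hm : sufHit pd m
    · simp only [scanSuf, hm, if_pos, Option.some.injEq] at h; simp [h]
    · simp only [scanSuf, hm, if_neg, Bool.false_eq_true, not_false_iff] at h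
      exact List.mem_cons_of_mem _ (ih h)

-- A's loop equals: first prefix hit, else first suffix hit of the reversed list, else the accumulator
theorem loopA_eq (pd : String) (l : List String) (acc : Option String) :
    loopA pd l acc =
      match scanPre pd l with
      | some n => some n
      | none => (scanSuf pd l.reverse).or acc := by
  induction l generalizing acc with
  | nil => simp [loopA, scanPre, scanSuf]
  | cons name rest ih =>
    by_cases hp : preHit pd name
    · simp [loopA, scanPre, hp]
    · by_cases hs : sufHit pd name
      · rw [show loopA pd (name :: rest) acc = loopA pd rest (some name) by
          simp [loopA, hp, hs], ih]
        simp only [scanPre, hp, Bool.false_eq_true, if_false, List.reverse_cons, scanSuf_append]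
        cases scanPre pd rest <;> simp [scanSuf, hs]
      · rw [show loopA pd (name :: rest) acc = loopA pd rest acc by simp [loopA, hp, hs], ih]
        simp only [scanPre, hp, Bool.false_eq_true, if_false, List.reverse_cons, scanSuf_append]
        cases scanPre pd rest <;> simp [scanSuf, hs]

theorem names_eq : PILOT_NAMES.map joinP = motogp_pilots := by decide

theorem pilots_nonempty : ∀ n ∈ motogp_pilots, n.toList ≠ [] := by decide

-- ===== VERDICT =====
theorem get_pilot_name_spec : Claim_equal_get_pilot_name := by
  intro pilot_data _
  unfold Spec_get_pilot_name get_pilot_name get_pilot_name_alt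
  rw [loopA_eq, scanPreP_eq, scanSufP_eq, List.map_reverse, names_eq]
  cases hp : scanPre pilot_data motogp_pilots with
  | some n =>
    have hn := pilots_nonempty n (scanPre_mem _ _ _ hp)
    simp [List.isEmpty_iff, hn]
  | none =>
    cases hs : scanSuf pilot_data motogp_pilots.reverse with
    | some m =>
      have hm := pilots_nonempty m (by
        have := scanSuf_mem _ _ _ hs
        simpa [List.mem_reverse] using this)
      simp [List.isEmpty_iff, hm]
    | none => simp
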